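-- pv_equiv track=rewrite | github.com/comaniac/slapo | examples/roberta/deepspeed_hf.py | even_partition
-- ===== SOURCE A (Python) =====
-- def even_partition(num_layers, num_pp):
--     """Evenly partition layers for pipelining. If num_layers is not divisible by
--     num_pp, the last num_layers % num_pp partitions will have one more layer.
--     """
--     remainder = num_layers % num_pp
--     size_list = [num_layers // num_pp] * num_pp
--
--     curr = size_list[0] - 1
--     ret = [curr]
--     for idx, size in enumerate(size_list):
--         size = size + 1 if num_pp - idx - 1 <= remainder else size
--         curr += size
--         ret.append(curr)
--     return ret[: num_pp - 1]
-- ===== SOURCE B (Python) =====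
-- def even_partition(num_layers, num_pp):
--     """Evenly partition layers for pipelining. If num_layers is not divisible by
--     num_pp, the last num_layers % num_pp partitions will have one more layer.
--     """
--     base = num_layers // num_pp
--     threshold = num_pp - num_layers % num_pp
--     return [(k + 1) * base + max(0, (k + 1) - threshold) - 1 for k in range(num_pp - 1)]
-- ===== Notes on version B (the rewrite author's own statement) =====
-- stated objective: simpler
-- what changed: Each boundary is computed directly by a closed-form expression of its index ((k+1)*base + max(0,(k+1)-threshold) - 1), removing A's size list, running accumulator, over-production of num_pp+1 entries and the final slice.
import Mathlib
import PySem

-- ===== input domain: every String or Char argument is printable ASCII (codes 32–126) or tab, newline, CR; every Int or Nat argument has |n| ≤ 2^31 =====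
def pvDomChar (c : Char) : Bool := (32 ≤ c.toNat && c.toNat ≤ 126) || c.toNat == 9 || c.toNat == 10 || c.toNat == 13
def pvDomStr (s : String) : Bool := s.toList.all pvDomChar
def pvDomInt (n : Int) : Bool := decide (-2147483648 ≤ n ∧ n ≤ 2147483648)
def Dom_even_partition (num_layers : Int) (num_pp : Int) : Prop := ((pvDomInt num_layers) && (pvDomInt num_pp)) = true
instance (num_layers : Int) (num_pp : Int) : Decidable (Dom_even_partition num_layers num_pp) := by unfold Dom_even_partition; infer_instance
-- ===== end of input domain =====

-- B replaces A's running-accumulator loop (over-produce then slice) by a per-index closed form; objective: simpler.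


-- ===== PORT A =====
-- the body of A's for-loop (curr accumulation + append), as a fold step
def epStep (num_pp remainder : Int) (st : Int × List Int) (p : Int × Int) : Int × List Int :=
  let size := if num_pp - p.1 - 1 ≤ remainder then p.2 + 1 else p.2
  (st.1 + size, st.2 ++ [st.1 + size])

def even_partition (num_layers : Int) (num_pp : Int) : List Int :=
  let remainder := PySem.Int.mod num_layers num_pp
  let size_list := List.replicate num_pp.toNat (PySem.Int.floordiv num_layers num_pp)
  -- size_list[0]: total form, in range whenever Pre_ holds (1 ≤ num_pp)
  let curr := PySem.List.pyGetD size_list 0 0 - 1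
  let st := (PySem.List.enumerate size_list 0).foldl (epStep num_pp remainder) (curr, [curr])
  PySem.List.slice st.2 none (some (num_pp - 1))

-- ===== PORT B =====
def even_partition_alt (num_layers : Int) (num_pp : Int) : List Int :=
  let base := PySem.Int.floordiv num_layers num_pp
  let threshold := num_pp - PySem.Int.mod num_layers num_pp
  (PySem.List.pyRange 0 (num_pp - 1) 1).map (fun k => (k + 1) * base + max 0 (k + 1 - threshold) - 1)

-- ===== PRECONDITION & SPEC =====
-- A raises on num_pp = 0 (ZeroDivisionError) and num_pp < 0 (IndexError on size_list[0]); excluded.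
def Pre_even_partition (num_layers : Int) (num_pp : Int) : Prop := 1 ≤ num_pp
instance (num_layers : Int) (num_pp : Int) : Decidable (Pre_even_partition num_layers num_pp) := by unfold Pre_even_partition; infer_instance
def pvWitness_even_partition : Int × Int := (7, 3)

def Spec_even_partition (num_layers : Int) (num_pp : Int) (out : List Int) : Prop := out = even_partition_alt num_layers num_pp
instance (num_layers : Int) (num_pp : Int) (out : List Int) : Decidable (Spec_even_partition num_layers num_pp out) := by unfold Spec_even_partition; infer_instance

-- ===== CLAIM (what is proved, stated in full; the proofs are below) =====
def Claim_equal_even_partition : Prop := ∀ (num_layers : Int) (num_pp : Int), Dom_even_partition num_layers num_pp → Pre_even_partition num_layers num_pp → Spec_even_partition num_layers num_pp (even_partition num_layers num_pp)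

-- ===== LEMMAS AND PROOFS =====
-- closed form for A's running boundary after k loop iterations
def epG (base t : Int) (k : Nat) : Int := base - 1 + k * base + max 0 ((k : Int) - t)

theorem epFold (num_pp remainder base : Int) (m : Nat) :
    (PySem.List.enumerate (List.replicate m base) 0).foldl (epStep num_pp remainder)
      (epG base (num_pp - 1 - remainder) 0, [epG base (num_pp - 1 - remainder) 0])
    = (epG base (num_pp - 1 - remainder) m,
       (List.range (m + 1)).map (epG base (num_pp - 1 - remainder))) := by
  induction m with
  | zero => simp [PySem.List.enumerate_nil]
  | succ m ih =>
    have hrep : List.replicate (m + 1) base = List.replicate m base ++ [base] := by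
      simp [List.replicate_succ' (n := m)]
    have harith : epG base (num_pp - 1 - remainder) m
        + (if num_pp - (0 + (m : Int)) - 1 ≤ remainder then base + 1 else base)
        = epG base (num_pp - 1 - remainder) (m + 1) := by
      simp only [epG]
      push_cast
      have hmul : ((m : Int) + 1) * base = (m : Int) * base + base := by ring
      rw [hmul]
      generalize (m : Int) * base = q
      split_ifs with h <;> omega
    rw [hrep, PySem.List.enumerate_append, List.foldl_append, ih]
    simp only [PySem.List.enumerate_cons, PySem.List.enumerate_nil, List.foldl_cons,
      List.foldl_nil, epStep, List.length_replicate, harith]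
    rw [List.range_succ (n := m + 1), List.map_append, List.map_singleton]

theorem even_partition_spec : Claim_equal_even_partition := by
  intro num_layers num_pp _ hpre
  unfold Pre_even_partition at hpre
  unfold Spec_even_partition even_partition even_partition_alt
  set base := PySem.Int.floordiv num_layers num_pp with hbase
  set remainder := PySem.Int.mod num_layers num_pp with hrem
  have hn : num_pp.toNat = (num_pp.toNat - 1) + 1 := by omega
  have hget : PySem.List.pyGetD (List.replicate num_pp.toNat base) (0 : Int) 0 = base := by
    rw [PySem.List.pyGetD_zero, hn]; simp [List.replicate_succ]
  simp only [hget]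
  have hml : remainder < num_pp := PySem.Int.mod_lt num_layers (by omega)
  have h0 : base - 1 = epG base (num_pp - 1 - remainder) 0 := by
    simp only [epG]; push_cast; omega
  rw [h0, epFold num_pp remainder base num_pp.toNat]
  rw [PySem.List.slice_to _ (by omega : (0:Int) ≤ num_pp - 1)]
  rw [← List.map_take, List.take_range, PySem.List.pyRange_one, List.map_map]
  have hmin : min (num_pp - 1).toNat (num_pp.toNat + 1) = (num_pp - 1 - 0).toNat := by omega
  rw [hmin]
  refine List.map_congr_left ?_
  intro k _
  simp only [Function.comp, epG]
  have hmul : (0 + (k : Int) + 1) * base = (k : Int) * base + base := by ring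
  rw [hmul]
  generalize (k : Int) * base = q
  omega
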